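-- pv_equiv track=rewrite | github.com/VirologyCharite/gb2seq | gb2seq/translate.py | _summarizeNoCoverage
-- ===== SOURCE A (Python) =====
-- from typing import Dict, List, Optional
--
-- _NO_COVERAGE = "no coverage "
--
-- def _summarizeNoCoverage(changes: List[str]) -> List[str]:
--     """
--     Summarize genome regions that have no coverage.
--
--     @param changes: A C{list} of C{str} changes, as returned by
--         getSubstitutionsString.
--     @return: A C{list} of C{str} summarized changes.
--     """
--     result = []
--     current = []
--     for change in changes:
--         if change.startswith(_NO_COVERAGE):
--             current.append(change[len(_NO_COVERAGE) :])
--         else: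
--             if current:
--                 result.append(_NO_COVERAGE + ", ".join(current))
--                 current = []
--             result.append(change)
--
--     if current:
--         result.append(_NO_COVERAGE + ", ".join(current))
--
--     return result
-- ===== SOURCE B (Python) =====
-- from typing import List
--
-- _NO_COVERAGE = "no coverage "
--
-- def _summarizeNoCoverage(changes: List[str]) -> List[str]:
--     # Two-stage index arithmetic: first find positions of the plain (non-coverage)
--     # changes; the gaps between consecutive plain positions are exactly the
--     # no-coverage runs, obtained by slicing.
--     n = len(changes)
--     plain = [i for i, c in enumerate(changes) if not c.startswith(_NO_COVERAGE)]
--     result = []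
--     prev = 0
--     for i in plain + [n]:
--         if i > prev:
--             result.append(
--                 _NO_COVERAGE
--                 + ", ".join(c[len(_NO_COVERAGE):] for c in changes[prev:i])
--             )
--         if i < n:
--             result.append(changes[i])
--         prev = i + 1
--     return result
-- ===== Notes on version B (the rewrite author's own statement) =====
-- stated objective: alternative
-- what changed: Replaced the single-pass running accumulator with a two-stage index computation: first collect the positions of the plain (non-prefixed) changes, then walk those positions and emit each gap between consecutive plain positions as one summary via list slicing.
import Mathlib
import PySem

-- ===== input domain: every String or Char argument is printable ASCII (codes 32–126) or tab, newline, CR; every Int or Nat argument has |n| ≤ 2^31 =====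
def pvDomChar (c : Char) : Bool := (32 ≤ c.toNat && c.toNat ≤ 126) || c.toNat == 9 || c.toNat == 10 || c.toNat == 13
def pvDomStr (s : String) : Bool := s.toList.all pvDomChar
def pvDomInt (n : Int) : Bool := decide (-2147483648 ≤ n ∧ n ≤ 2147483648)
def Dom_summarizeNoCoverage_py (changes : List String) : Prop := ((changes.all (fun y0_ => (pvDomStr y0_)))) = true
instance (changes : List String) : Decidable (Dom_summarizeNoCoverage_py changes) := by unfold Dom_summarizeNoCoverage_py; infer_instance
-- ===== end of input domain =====

-- B replaces A's single-pass running accumulator by a two-stage index computation: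
-- collect the positions of the plain changes, then emit each gap between consecutive
-- plain positions as one summary via list slicing (alternative decomposition; same cost).

-- ===== PORT A =====
def pvNC : String := "no coverage "

-- Python's change[len(_NO_COVERAGE):]
def pvStrip (c : String) : String := PySem.Str.slice c (some 12) none

-- the for-loop of A, as structural recursion over the same (result, current) state
def pvAGo (result current : List String) : List String → List String
  | [] => if current ≠ [] then result ++ [pvNC ++ PySem.Str.join ", " current] else result
  | change :: rest =>
      if PySem.Str.startswith change pvNC then
        pvAGo result (current ++ [pvStrip change]) rest
      else
        let result' := if current ≠ [] then result ++ [pvNC ++ PySem.Str.join ", " current] else result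
        pvAGo (result' ++ [change]) [] rest

def summarizeNoCoverage_py (changes : List String) : List String :=
  pvAGo [] [] changes

-- ===== PORT B =====
-- [i for i, c in enumerate(changes) if not c.startswith(_NO_COVERAGE)]
def pvPlain (changes : List String) : List Int :=
  ((PySem.List.enumerate changes).filter
      (fun p => !PySem.Str.startswith p.2 pvNC)).map (fun p => p.1)

-- the 'for i in plain + [n]' loop of B, carrying prev; each iteration's appends are
-- emitted in order.  changes[i] is always in range here (i ∈ plain, i < n), so pyGetD is exact.
def pvBGo (changes : List String) (n : Int) : Int → List Int → List String
  | _, [] => []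
  | prev, i :: rest =>
      (if i > prev then
        [pvNC ++ PySem.Str.join ", "
          ((PySem.List.slice changes (some prev) (some i)).map pvStrip)]
       else [])
      ++ (if i < n then [PySem.List.pyGetD changes i ""] else [])
      ++ pvBGo changes n (i + 1) rest

def summarizeNoCoverage_py_alt (changes : List String) : List String :=
  pvBGo changes (changes.length : Int) 0 (pvPlain changes ++ [(changes.length : Int)])

-- ===== PRECONDITION & SPEC =====
def Spec_summarizeNoCoverage_py (changes : List String) (out : List String) : Prop := out = summarizeNoCoverage_py_alt changes
instance (changes : List String) (out : List String) : Decidable (Spec_summarizeNoCoverage_py changes out) := by unfold Spec_summarizeNoCoverage_py; infer_instance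

-- ===== CLAIM (what is proved, stated in full; the proofs are below) =====
def Claim_equal_summarizeNoCoverage_py : Prop := ∀ (changes : List String), Dom_summarizeNoCoverage_py changes → Spec_summarizeNoCoverage_py changes (summarizeNoCoverage_py changes)

-- ===== LEMMAS AND PROOFS =====

-- abbreviation used by the proofs: A's flush of a pending run
def pvFlush (cur : List String) : List String :=
  if cur ≠ [] then [pvNC ++ PySem.Str.join ", " cur] else []

def pvP (c : String) : Bool := PySem.Str.startswith c pvNC

-- Nat-level plain-index list, used to reason about pvPlain
def pvPlainN : List String → List Nat
  | [] => []
  | c :: rest => (if pvP c then [] else [0]) ++ (pvPlainN rest).map (· + 1)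

theorem pvAGo_prefix (l : List String) : ∀ (res cur : List String),
    pvAGo res cur l = res ++ pvAGo [] cur l := by
  induction l with
  | nil => intro res cur; simp [pvAGo]; split_ifs <;> simp
  | cons c rest ih =>
      intro res cur
      simp only [pvAGo]
      by_cases h1 : PySem.Str.startswith c pvNC
      · simp only [h1, if_pos]
        exact ih _ _
      · simp only [h1, Bool.false_eq_true, if_neg, not_false_iff]
        conv_rhs => rw [ih]
        rw [ih]
        split_ifs <;> simp

theorem pvAGo_nil_eq_flush (res cur : List String) :
    pvAGo res cur [] = res ++ pvFlush cur := by
  simp only [pvAGo, pvFlush]; split_ifs <;> simp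

-- consuming an all-coverage block just extends the pending accumulator
theorem pvAGo_cov (g : List String) (hg : ∀ c ∈ g, pvP c = true) :
    ∀ (res cur : List String) (m : List String),
      pvAGo res cur (g ++ m) = pvAGo res (cur ++ g.map pvStrip) m := by
  induction g with
  | nil => intro res cur m; simp
  | cons c g ih =>
      intro res cur m
      have hc : PySem.Str.startswith c pvNC = true := hg c (by simp)
      simp only [List.cons_append, pvAGo, hc, if_pos]
      rw [ih (fun x hx => hg x (by simp [hx]))]
      simp

-- A's run recurrence
theorem pvA_run (g : List String) (hg : ∀ c ∈ g, pvP c = true)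
    (c : String) (hc : pvP c = false) (rest : List String) :
    pvAGo [] [] (g ++ c :: rest) = pvFlush (g.map pvStrip) ++ c :: pvAGo [] [] rest := by
  have hc' : PySem.Str.startswith c pvNC = false := hc
  rw [pvAGo_cov g hg]
  simp only [List.nil_append, pvAGo, hc', Bool.false_eq_true, if_neg, not_false_iff]
  rw [pvAGo_prefix]
  simp only [pvFlush]
  split_ifs <;> simp

-- A's all-coverage base case
theorem pvA_cov_all (g : List String) (hg : ∀ c ∈ g, pvP c = true) :
    pvAGo [] [] g = pvFlush (g.map pvStrip) := by
  have := pvAGo_cov g hg [] [] []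
  simpa [pvAGo_nil_eq_flush] using this

-- pvPlain computed from pvPlainN
theorem pvPlain_shift (l : List String) : ∀ (s : Int),
    ((PySem.List.enumerate l s).filter
        (fun p => !PySem.Str.startswith p.2 pvNC)).map (fun p => p.1)
      = (pvPlainN l).map (fun k : Nat => s + (k : Int)) := by
  induction l with
  | nil => intro s; simp [PySem.List.enumerate_nil, pvPlainN]
  | cons c rest ih =>
      intro s
      rw [PySem.List.enumerate_cons]
      by_cases hc : pvP c
      · have hb : (!PySem.Str.startswith c pvNC) = false := by
          have hcc : PySem.Str.startswith c pvNC = true := hc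
          rw [hcc]; rfl
        have h0 : pvPlainN (c :: rest) = (pvPlainN rest).map (· + 1) := by
          simp [pvPlainN, hc]
        rw [h0, List.filter_cons, hb]
        rw [if_neg (by simp)]
        rw [ih (s + 1), List.map_map]
        apply List.map_congr_left
        intro k _
        simp only [Function.comp]
        push_cast
        ring
      · have hcf : PySem.Str.startswith c pvNC = false := by
          simpa using hc
        have hb : (!PySem.Str.startswith c pvNC) = true := by rw [hcf]; rfl
        have h0 : pvPlainN (c :: rest) = 0 :: (pvPlainN rest).map (· + 1) := by
          simp [pvPlainN, hc]
        rw [h0, List.filter_cons, hb]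
        rw [if_pos rfl]
        simp only [List.map_cons]
        rw [ih (s + 1), List.map_map]
        congr 1
        · simp
        · apply List.map_congr_left
          intro k _
          simp only [Function.comp]
          push_cast
          ring

theorem pvPlain_eq (l : List String) :
    pvPlain l = (pvPlainN l).map (fun k : Nat => (k : Int)) := by
  unfold pvPlain PySem.List.enumerate
  have := pvPlain_shift l 0
  unfold PySem.List.enumerate at this
  rw [this]
  simp

theorem pvPlainN_append_cov (g : List String) (hg : ∀ c ∈ g, pvP c = true) :
    ∀ (m : List String), pvPlainN (g ++ m) = (pvPlainN m).map (· + g.length) := by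
  induction g with
  | nil => intro m; simp
  | cons c g ih =>
      intro m
      have hc := hg c (by simp)
      simp only [List.cons_append, pvPlainN, hc, if_pos, List.nil_append]
      rw [ih (fun x hx => hg x (by simp [hx]))]
      simp only [List.map_map, List.length_cons]
      apply List.map_congr_left
      intro k _
      simp [Function.comp]
      omega

-- shifting the whole index loop past a consumed prefix
theorem pvBGo_shift (pre l : List String) (nn q : Nat) (ks : List Nat) :
    pvBGo (pre ++ l) (((pre.length + nn : Nat) : Int)) (((pre.length + q : Nat) : Int))
        (ks.map (fun k : Nat => ((pre.length + k : Nat) : Int)))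
      = pvBGo l (nn : Int) (q : Int) (ks.map (fun k : Nat => (k : Int))) := by
  induction ks generalizing q with
  | nil => simp [pvBGo]
  | cons k ks ih =>
      simp only [List.map_cons, pvBGo]
      have hseg1 : (if ((pre.length + k : Nat) : Int) > ((pre.length + q : Nat) : Int) then
          [pvNC ++ PySem.Str.join ", "
            ((PySem.List.slice (pre ++ l) (some ((pre.length + q : Nat) : Int))
              (some ((pre.length + k : Nat) : Int))).map pvStrip)]
          else [])
          = (if ((k : Nat) : Int) > ((q : Nat) : Int) then
          [pvNC ++ PySem.Str.join ", "
            ((PySem.List.slice l (some ((q : Nat) : Int)) (some ((k : Nat) : Int))).map pvStrip)]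
          else []) := by
        by_cases h : q < k
        · rw [if_pos (by exact_mod_cast Nat.add_lt_add_left h _), if_pos (by exact_mod_cast h)]
          rw [PySem.List.slice_natCast, PySem.List.slice_natCast, List.drop_length_add_append]
          have he : pre.length + k - (pre.length + q) = k - q := by omega
          rw [he]
        · rw [if_neg (by omega), if_neg (by omega)]
      have hseg2 : (if ((pre.length + k : Nat) : Int) < ((pre.length + nn : Nat) : Int) then
            [PySem.List.pyGetD (pre ++ l) ((pre.length + k : Nat) : Int) ""] else [])
          = (if ((k : Nat) : Int) < ((nn : Nat) : Int) then
            [PySem.List.pyGetD l ((k : Nat) : Int) ""] else []) := by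
        by_cases h : k < nn
        · rw [if_pos (by omega), if_pos (by omega)]
          simp only [PySem.List.pyGetD_natCast]
          simp [List.getD, List.getElem?_append_right]
        · rw [if_neg (by omega), if_neg (by omega)]
      rw [hseg1, hseg2]
      have e1 : ((pre.length + k : Nat) : Int) + 1 = ((pre.length + (k + 1) : Nat) : Int) := by
        push_cast; ring
      have e2 : ((k : Nat) : Int) + 1 = (((k + 1) : Nat) : Int) := by push_cast; ring
      rw [e1, e2, ih (k + 1)]

-- B's all-coverage base case
theorem pvB_cov_all (g : List String) (hg : ∀ c ∈ g, pvP c = true) :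
    summarizeNoCoverage_py_alt g = pvFlush (g.map pvStrip) := by
  unfold summarizeNoCoverage_py_alt
  have hp : pvPlain g = [] := by
    rw [pvPlain_eq]
    have h0 := pvPlainN_append_cov g hg []
    simp only [List.append_nil] at h0
    simp [h0, pvPlainN]
  rw [hp]
  simp only [List.nil_append, pvBGo]
  by_cases h0 : g = []
  · subst h0; simp [pvFlush]
  · have hlen : 0 < g.length := List.length_pos_iff.mpr h0
    have h1 : ((g.length : Int) > 0) := by exact_mod_cast hlen
    rw [if_pos h1, if_neg (lt_irrefl _)]
    have hs : PySem.List.slice g (some (0 : Int)) (some ((g.length : Nat) : Int)) = g := by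
      have h2 := PySem.List.slice_natCast (xs := g) (a := 0) (b := g.length)
      simpa using h2
    rw [hs]
    simp [pvFlush, h0]

-- B's run recurrence
theorem pvB_run (g : List String) (hg : ∀ c ∈ g, pvP c = true)
    (c : String) (hc : pvP c = false) (rest : List String) :
    summarizeNoCoverage_py_alt (g ++ c :: rest)
      = pvFlush (g.map pvStrip) ++ c :: summarizeNoCoverage_py_alt rest := by
  have hc' : PySem.Str.startswith c pvNC = false := hc
  unfold summarizeNoCoverage_py_alt
  have hp : pvPlain (g ++ c :: rest)
      = ((g.length : Nat) : Int) :: (pvPlainN rest).map (fun k : Nat => ((g.length + 1 + k : Nat) : Int)) := by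
    rw [pvPlain_eq, pvPlainN_append_cov g hg]
    have h0 : pvPlainN (c :: rest) = 0 :: (pvPlainN rest).map (· + 1) := by
      simp [pvPlainN, hc]
    rw [h0]
    simp only [List.map_cons, List.map_map]
    congr 1
    · simp
    · apply List.map_congr_left
      intro k _
      simp only [Function.comp]
      congr 1
      omega
  rw [hp]
  have hlen : (g ++ c :: rest).length = g.length + 1 + rest.length := by simp; omega
  rw [hlen]
  simp only [List.cons_append, pvBGo]
  have h1 : ((g.length : Nat) : Int) > 0 ∨ g = [] := by
    by_cases h : g = []
    · right; exact h
    · left; exact_mod_cast List.length_pos_iff.mpr h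
  have hslice : PySem.List.slice (g ++ c :: rest) (some (0 : Int)) (some ((g.length : Nat) : Int)) = g := by
    have h2 := PySem.List.slice_natCast (xs := g ++ c :: rest) (a := 0) (b := g.length)
    simpa [List.take_left] using h2

  have hchunk : (if ((g.length : Nat) : Int) > 0 then
      [pvNC ++ PySem.Str.join ", "
        ((PySem.List.slice (g ++ c :: rest) (some (0 : Int)) (some ((g.length : Nat) : Int))).map pvStrip)]
      else []) = pvFlush (g.map pvStrip) := by
    rw [hslice]
    rcases h1 with h | h
    · rw [if_pos h]
      have hne : g ≠ [] := by
        intro he; subst he; simp at h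
      simp [pvFlush, hne]
    · subst h; simp [pvFlush]
  rw [hchunk]
  have hn : ((g.length : Nat) : Int) < ((g.length + 1 + rest.length : Nat) : Int) := by
    push_cast; omega
  rw [if_pos hn]
  have hget : PySem.List.pyGetD (g ++ c :: rest) ((g.length : Nat) : Int) "" = c := by
    simp only [PySem.List.pyGetD_natCast]
    simp [List.getD]
  rw [hget]
  have htail : pvBGo (g ++ c :: rest) ((g.length + 1 + rest.length : Nat) : Int)
      (((g.length : Nat) : Int) + 1)
      ((pvPlainN rest).map (fun k : Nat => ((g.length + 1 + k : Nat) : Int)) ++ [((g.length + 1 + rest.length : Nat) : Int)])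
      = pvBGo rest ((rest.length : Nat) : Int) 0 ((pvPlainN rest).map (fun k : Nat => ((k : Nat) : Int)) ++ [((rest.length : Nat) : Int)]) := by
    have hshift := pvBGo_shift (g ++ [c]) rest rest.length 0 (pvPlainN rest ++ [rest.length])
    have e1 : (g ++ [c]) ++ rest = g ++ c :: rest := by simp
    have e2 : (g ++ [c]).length = g.length + 1 := by simp
    rw [e1, e2] at hshift
    have e3 : ((g.length + 1 + 0 : Nat) : Int) = ((g.length : Nat) : Int) + 1 := by push_cast; ring
    rw [e3] at hshift
    have e4 : (pvPlainN rest ++ [rest.length]).map (fun k : Nat => ((g.length + 1 + k : Nat) : Int))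
        = (pvPlainN rest).map (fun k : Nat => ((g.length + 1 + k : Nat) : Int)) ++ [((g.length + 1 + rest.length : Nat) : Int)] := by
      simp
    have e5 : (pvPlainN rest ++ [rest.length]).map (fun k : Nat => ((k : Nat) : Int))
        = (pvPlainN rest).map (fun k : Nat => ((k : Nat) : Int)) ++ [((rest.length : Nat) : Int)] := by
      simp
    rw [e4, e5] at hshift
    have e6 : ((0 : Nat) : Int) = (0 : Int) := by norm_num
    rw [e6] at hshift
    exact hshift
  rw [htail]
  rw [pvPlain_eq rest]
  simp

theorem pv_bridge (l : List String) :
    pvAGo [] [] l = summarizeNoCoverage_py_alt l := by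
  generalize hm : l.countP (fun c => !pvP c) = m
  induction m using Nat.strong_induction_on generalizing l with
  | _ m ih =>
    rcases hdw : l.dropWhile pvP with _ | ⟨c, rest⟩
    · have hall : ∀ c ∈ l, pvP c = true := by
        simp only [List.dropWhile_eq_nil_iff] at hdw; exact hdw
      rw [pvA_cov_all l hall, pvB_cov_all l hall]
    · have hc : pvP c = false := by
        have h2 := List.head_dropWhile_not pvP (l := l) (by simp [hdw])
        simpa [hdw] using h2
      have hl : l = l.takeWhile pvP ++ c :: rest := by
        rw [← hdw, List.takeWhile_append_dropWhile]
      have hg : ∀ x ∈ l.takeWhile pvP, pvP x = true := fun x hx => List.mem_takeWhile_imp hx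
      have hdec : rest.countP (fun c => !pvP c) < m := by
        subst hm
        conv_rhs => rw [hl]
        rw [List.countP_append, List.countP_cons]
        simp [hc]
        omega
      rw [hl, pvA_run _ hg c hc rest, pvB_run _ hg c hc rest]
      rw [ih _ hdec rest rfl]

-- ===== VERDICT (by name: the statement is the Claim_ definition above) =====
theorem summarizeNoCoverage_py_spec : Claim_equal_summarizeNoCoverage_py := by
  intro changes _
  unfold Spec_summarizeNoCoverage_py summarizeNoCoverage_py
  exact pv_bridge changes
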